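-- pv_equiv track=rewrite | github.com/MaxMeiY/leetcode | teemo_attack.py | findPoisonedDuration
-- ===== SOURCE A (Python) =====
-- def findPoisonedDuration(timeSeries, duration):
--     """
--     :type timeSeries: List[int]
--     :type duration: int
--     :rtype: int
--     """
--     ans = 0
--     for i in range(1, len(timeSeries)):
--         if timeSeries[i] > timeSeries[i-1] + duration - 1:
--             ans += duration
--         elif timeSeries[i] == timeSeries[i-1] + duration - 1:
--             ans += duration - 1
--         else:
--             ans += timeSeries[i] - timeSeries[i-1]
--     return ans + duration if len(timeSeries) != 0 else 0
-- ===== SOURCE B (Python) =====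
-- def findPoisonedDuration(timeSeries, duration):
--     # Interval-merging approach: build the list of merged poisoned intervals,
--     # then sum their lengths in a second pass.
--     intervals = []
--     for t in timeSeries:
--         if intervals and t < intervals[-1][1]:
--             intervals[-1] = (intervals[-1][0], t + duration)
--         else:
--             intervals.append((t, t + duration))
--     return sum(e - s for s, e in intervals)
-- ===== Notes on version B (the rewrite author's own statement) =====
-- stated objective: alternative
-- what changed: B builds an explicit list of merged poisoned intervals (extending the last interval's end on overlap, appending a new one otherwise) and then sums interval lengths in a second pass, instead of A's indexed loop adding a per-pair increment through a three-way branch plus a trailing +duration.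
import Mathlib
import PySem

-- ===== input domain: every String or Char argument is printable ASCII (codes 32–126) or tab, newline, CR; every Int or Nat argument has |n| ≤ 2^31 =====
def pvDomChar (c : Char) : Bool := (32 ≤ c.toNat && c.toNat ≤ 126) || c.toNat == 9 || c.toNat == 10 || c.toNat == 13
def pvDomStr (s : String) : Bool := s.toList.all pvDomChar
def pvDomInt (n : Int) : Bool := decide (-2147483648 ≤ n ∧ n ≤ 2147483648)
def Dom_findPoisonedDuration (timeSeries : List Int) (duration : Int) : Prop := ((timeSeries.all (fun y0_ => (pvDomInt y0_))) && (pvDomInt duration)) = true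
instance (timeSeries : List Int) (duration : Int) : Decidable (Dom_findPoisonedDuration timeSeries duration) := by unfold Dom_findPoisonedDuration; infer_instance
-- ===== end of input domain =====

-- B builds the merged poisoned intervals explicitly and sums their lengths in a
-- second pass, instead of A's indexed three-way-branch accumulator; total
-- equivalence is proved (no Pre_ needed).

-- ===== PORT A =====
def findPoisonedDuration (timeSeries : List Int) (duration : Int) : Int :=
  let ans : Int :=
    (PySem.List.pyRange 1 (timeSeries.length : Int) 1).foldl
      (fun ans i =>
        if PySem.List.pyGetD timeSeries i 0 > PySem.List.pyGetD timeSeries (i-1) 0 + duration - 1 then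
          ans + duration
        else if PySem.List.pyGetD timeSeries i 0 = PySem.List.pyGetD timeSeries (i-1) 0 + duration - 1 then
          ans + (duration - 1)
        else
          ans + (PySem.List.pyGetD timeSeries i 0 - PySem.List.pyGetD timeSeries (i-1) 0)) 0
  if timeSeries.length ≠ 0 then ans + duration else 0

-- ===== PORT B =====
-- one step of B's loop body: extend the last interval on overlap, else append
def pvStepB (duration : Int) (ivs : List (Int × Int)) (t : Int) : List (Int × Int) :=
  match ivs.getLast? with
  | some last =>
      if t < last.2 then ivs.dropLast ++ [(last.1, t + duration)]
      else ivs ++ [(t, t + duration)]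
  | none => [(t, t + duration)]

def findPoisonedDuration_alt (timeSeries : List Int) (duration : Int) : Int :=
  let intervals : List (Int × Int) := timeSeries.foldl (pvStepB duration) []
  (intervals.map (fun p => p.2 - p.1)).sum

-- ===== PRECONDITION & SPEC =====
def Spec_findPoisonedDuration (timeSeries : List Int) (duration : Int) (out : Int) : Prop := out = findPoisonedDuration_alt timeSeries duration
instance (timeSeries : List Int) (duration : Int) (out : Int) : Decidable (Spec_findPoisonedDuration timeSeries duration out) := by unfold Spec_findPoisonedDuration; infer_instance

-- ===== CLAIM (what is proved, stated in full; the proofs are below) =====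
def Claim_equal_findPoisonedDuration : Prop := ∀ (timeSeries : List Int) (duration : Int), Dom_findPoisonedDuration timeSeries duration → Spec_findPoisonedDuration timeSeries duration (findPoisonedDuration timeSeries duration)

-- ===== LEMMAS AND PROOFS =====

-- common reference value: per-pair contribution, recursively along the list
def pvGo (duration prev : Int) : List Int → Int
  | [] => 0
  | t :: r => (if t ≥ prev + duration then duration else t - prev) + pvGo duration t r

-- A's per-index branch value, as a function of the two neighbours.
def pvStepA (duration prev cur : Int) : Int :=
  if cur > prev + duration - 1 then duration
  else if cur = prev + duration - 1 then duration - 1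
  else cur - prev

lemma pvStepA_eq (duration prev cur : Int) :
    pvStepA duration prev cur = if cur ≥ prev + duration then duration else cur - prev := by
  unfold pvStepA; split_ifs <;> omega

-- The index list A maps over equals the zipped consecutive pairs, elementwise.
lemma pvMap_range_eq_zip (ts : List Int) (g : Int → Int → Int) :
    (PySem.List.pyRange 1 (ts.length : Int) 1).map
      (fun i => g (PySem.List.pyGetD ts (i-1) 0) (PySem.List.pyGetD ts i 0))
    = (ts.zip ts.tail).map (fun p => g p.1 p.2) := by
  apply List.ext_getElem
  · simp only [List.length_map, PySem.List.length_pyRange_one, List.length_zip, List.length_tail]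
    omega
  · intro k h1 h2
    have hk : k + 1 < ts.length := by
      simp only [List.length_map, List.length_zip, List.length_tail] at h2
      omega
    have hz : k < (ts.zip ts.tail).length := by
      simp only [List.length_zip, List.length_tail]; omega
    rw [List.getElem_map, List.getElem_map, List.getElem_zip,
      PySem.List.getElem_pyRange_one]
    have h1' : (1 : Int) + (k : Int) - 1 = ((k : Nat) : Int) := by omega
    have h2' : (1 : Int) + (k : Int) = (((k + 1 : Nat)) : Int) := by push_cast; ring
    rw [h1', h2', PySem.List.pyGetD_natCast, PySem.List.pyGetD_natCast,
      List.getD_eq_getElem ts 0 (by omega), List.getD_eq_getElem ts 0 hk,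
      List.getElem_tail]

-- Fold of A's loop equals the sum of per-pair step values.
lemma pvFoldA_eq_sum (ts : List Int) (duration : Int) :
    (PySem.List.pyRange 1 (ts.length : Int) 1).foldl
      (fun ans i =>
        if PySem.List.pyGetD ts i 0 > PySem.List.pyGetD ts (i-1) 0 + duration - 1 then
          ans + duration
        else if PySem.List.pyGetD ts i 0 = PySem.List.pyGetD ts (i-1) 0 + duration - 1 then
          ans + (duration - 1)
        else
          ans + (PySem.List.pyGetD ts i 0 - PySem.List.pyGetD ts (i-1) 0)) 0
    = ((ts.zip ts.tail).map (fun p => pvStepA duration p.1 p.2)).sum := by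
  have hfun : (fun (ans i : Int) =>
        if PySem.List.pyGetD ts i 0 > PySem.List.pyGetD ts (i-1) 0 + duration - 1 then
          ans + duration
        else if PySem.List.pyGetD ts i 0 = PySem.List.pyGetD ts (i-1) 0 + duration - 1 then
          ans + (duration - 1)
        else
          ans + (PySem.List.pyGetD ts i 0 - PySem.List.pyGetD ts (i-1) 0))
      = (fun ans i => ans + pvStepA duration (PySem.List.pyGetD ts (i-1) 0) (PySem.List.pyGetD ts i 0)) := by
    funext ans i
    unfold pvStepA
    split_ifs <;> ring
  rw [hfun, PySem.List.foldl_add, zero_add,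
    pvMap_range_eq_zip ts (fun prev cur => pvStepA duration prev cur)]

-- sum of zipped per-pair steps = the recursive reference pvGo
lemma pvZipSum_eq_go (duration : Int) (x : Int) (rest : List Int) :
    (((x :: rest).zip rest).map (fun p => pvStepA duration p.1 p.2)).sum
    = pvGo duration x rest := by
  induction rest generalizing x with
  | nil => simp [pvGo]
  | cons y r ih =>
    rw [List.zip_cons_cons, List.map_cons, List.sum_cons, pvStepA_eq, ih y, pvGo]

def pvSumLen (ivs : List (Int × Int)) : Int := (ivs.map (fun p => p.2 - p.1)).sum

lemma pvSumLen_append (l : List (Int × Int)) (p : Int × Int) :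
    pvSumLen (l ++ [p]) = pvSumLen l + (p.2 - p.1) := by
  simp [pvSumLen]

-- B's loop invariant: folding over ts starting from an accumulator whose last
-- interval ends at e contributes e - duration as the previous attack time.
lemma pvB_inv (duration : Int) (ts : List Int) (ivs : List (Int × Int)) (a e : Int) :
    pvSumLen (ts.foldl (pvStepB duration) (ivs ++ [(a, e)]))
    = pvSumLen ivs + (e - a) + pvGo duration (e - duration) ts := by
  induction ts generalizing ivs a e with
  | nil => simp [pvGo, pvSumLen_append]
  | cons t r ih =>
    simp only [List.foldl_cons, pvGo]
    have hlast : (ivs ++ [(a, e)]).getLast? = some (a, e) := by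
      simp
    by_cases h : t < e
    · have hstep : pvStepB duration (ivs ++ [(a, e)]) t = ivs ++ [(a, t + duration)] := by
        simp [pvStepB, hlast, h]
      rw [hstep, ih]
      have : ¬ t ≥ e - duration + duration := by omega
      rw [if_neg this]
      ring_nf
    · have hstep : pvStepB duration (ivs ++ [(a, e)]) t
          = (ivs ++ [(a, e)]) ++ [(t, t + duration)] := by
        simp [pvStepB, hlast, h]
      rw [hstep, ih, pvSumLen_append]
      have : t ≥ e - duration + duration := by omega
      rw [if_pos this]
      ring_nf

lemma pvB_eq_go (duration : Int) (x : Int) (rest : List Int) :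
    findPoisonedDuration_alt (x :: rest) duration = duration + pvGo duration x rest := by
  show pvSumLen ((x :: rest).foldl (pvStepB duration) []) = _
  simp only [List.foldl_cons]
  have h0 : pvStepB duration [] x = [] ++ [(x, x + duration)] := by simp [pvStepB]
  rw [h0, pvB_inv]
  simp only [pvSumLen, List.map_nil, List.sum_nil]
  have hx : x + duration - duration = x := by ring
  rw [hx]; ring

-- ===== VERDICT (by name: the statement is the Claim_ definition above) =====
theorem findPoisonedDuration_spec : Claim_equal_findPoisonedDuration := by
  intro ts duration _
  show _ = _
  cases ts with
  | nil => rfl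
  | cons x rest =>
    rw [pvB_eq_go]
    simp only [findPoisonedDuration]
    rw [if_pos (by simp : (x :: rest).length ≠ 0)]
    rw [pvFoldA_eq_sum (x :: rest) duration]
    have : (x :: rest).tail = rest := rfl
    rw [this, pvZipSum_eq_go]
    ring
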